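-- pv_equiv track=rewrite | github.com/sacross93/biosignalresearch | anssignal.py | check_abp_int
-- ===== SOURCE A (Python) =====
-- def check_abp_int(a_peaks, up_peaks):
--     sink = 0
--     while up_peaks[sink] < a_peaks[0]:
--         sink += 1
--         if sink >= len(up_peaks):
--             break
--     dp = []
--     up_peaks = up_peaks[sink:]
--     for i in range(len(up_peaks)):
--         for j in range(len(a_peaks)):
--             pitv = up_peaks[i] - a_peaks[j]
--             if pitv < 0:
--                 dp.append(a_peaks[j - 1])
--                 break
--     a_peaks = dp
--
--     for i in range(len(a_peaks) - 1):
--         if up_peaks[i] - a_peaks[i] > a_peaks[i + 1] - up_peaks[i]: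
--             return True
--     return False
-- ===== SOURCE B (Python) =====
-- def check_abp_int(a_peaks, up_peaks):
--     a0 = a_peaks[0]
--     sink = len(up_peaks)
--     for i, u in enumerate(up_peaks):
--         if u >= a0:
--             sink = i
--             break
--     ups = up_peaks[sink:]
--     # Strictly-increasing prefix records of a_peaks, each paired with the
--     # element just before it (the element before the first one is a_peaks[-1]).
--     recs = []
--     best = None
--     prev = a_peaks[-1]
--     for v in a_peaks:
--         if best is None or v > best:
--             recs.append((v, prev))
--             best = v
--         prev = v
--     dp = []
--     for u in ups:
--         # first record value > u, by binary search (record values are increasing)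
--         lo, hi = 0, len(recs)
--         while lo < hi:
--             mid = (lo + hi) // 2
--             if recs[mid][0] > u:
--                 hi = mid
--             else:
--                 lo = mid + 1
--         if lo < len(recs):
--             dp.append(recs[lo][1])
--     return any(ups[i] - dp[i] > dp[i + 1] - ups[i] for i in range(len(dp) - 1))
-- ===== Notes on version B (the rewrite author's own statement) =====
-- stated objective: faster
-- what changed: Replaces the O(n*m) nested scan (for every up-peak, rescan all a_peaks for the first one above it) by a one-pass precomputation of the strictly-increasing prefix records of a_peaks paired with their preceding element, plus a binary search per up-peak over that sorted record list, O((n+m) log n).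
import Mathlib
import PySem

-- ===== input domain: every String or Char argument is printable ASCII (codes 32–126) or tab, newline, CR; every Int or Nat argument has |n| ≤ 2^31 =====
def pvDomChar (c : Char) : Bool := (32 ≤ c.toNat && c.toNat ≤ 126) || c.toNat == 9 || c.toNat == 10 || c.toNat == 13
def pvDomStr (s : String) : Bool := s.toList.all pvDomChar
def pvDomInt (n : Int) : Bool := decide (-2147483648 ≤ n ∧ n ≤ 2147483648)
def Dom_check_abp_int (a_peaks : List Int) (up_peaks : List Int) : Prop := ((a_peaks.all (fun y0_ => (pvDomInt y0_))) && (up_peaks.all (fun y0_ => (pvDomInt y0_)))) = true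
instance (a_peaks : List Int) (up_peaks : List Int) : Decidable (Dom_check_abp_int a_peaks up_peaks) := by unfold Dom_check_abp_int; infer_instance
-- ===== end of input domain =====

-- B replaces A's nested O(n*m) scan by a precomputed record list of a_peaks plus a binary
-- search per up-peak (objective: faster, asymptotic; measured).

-- ===== PORT A =====
-- while up_peaks[sink] < a_peaks[0]: sink += 1; if sink >= len(up_peaks): break
def pvA_sink (up : List Int) (a0 : Int) (sink : Nat) : Nat :=
  if PySem.List.pyGetD up (sink : Int) 0 < a0 then
    if up.length ≤ sink + 1 then sink + 1
    else pvA_sink up a0 (sink + 1)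
  else sink
termination_by up.length - sink
decreasing_by omega

-- inner 'for j in range(len(a_peaks)): if up - a_peaks[j] < 0: dp.append(a_peaks[j-1]); break'
-- (both indexings are in range in Python whenever a_peaks ≠ []; j-1 = -1 wraps to the last element)
def pvA_find (a : List Int) (u : Int) (j : Nat) : Option Int :=
  if j < a.length then
    if u - PySem.List.pyGetD a (j : Int) 0 < 0 then
      some (PySem.List.pyGetD a ((j : Int) - 1) 0)
    else pvA_find a u (j + 1)
  else none
termination_by a.length - j

def check_abp_int (a_peaks : List Int) (up_peaks : List Int) : Bool :=
  let sink := pvA_sink up_peaks (PySem.List.pyGetD a_peaks 0 0) 0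
  let ups := PySem.List.slice up_peaks (some (sink : Int)) none
  let dp := ups.foldl (fun dp u =>
    match pvA_find a_peaks u 0 with
    | some v => dp ++ [v]
    | none => dp) []
  (List.range (dp.length - 1)).any (fun i =>
    PySem.List.pyGetD dp ((i : Int) + 1) 0 - PySem.List.pyGetD ups (i : Int) 0 <
    PySem.List.pyGetD ups (i : Int) 0 - PySem.List.pyGetD dp (i : Int) 0)

-- ===== PORT B =====
-- for i, u in enumerate(up_peaks): if u >= a0: sink = i; break   (else sink = len(up_peaks))
def pvB_sink (l : List Int) (a0 : Int) (i : Nat) (n : Nat) : Nat :=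
  match l with
  | [] => n
  | u :: rest => if a0 ≤ u then i else pvB_sink rest a0 (i + 1) n

-- one pass over a_peaks building the strictly-increasing prefix records, each with its 'prev'
def pvB_recs : List Int → Option Int → Int → List (Int × Int)
  | [], _, _ => []
  | v :: rest, best, prev =>
    if (match best with | none => true | some b => decide (b < v)) then
      (v, prev) :: pvB_recs rest (some v) v
    else pvB_recs rest best v

-- while lo < hi: mid = (lo+hi)//2; if recs[mid][0] > u: hi = mid else: lo = mid+1
-- ((lo+hi)//2 on nonnegative ints = Nat division)
def pvB_bs (recs : List (Int × Int)) (u : Int) (lo hi : Nat) : Nat :=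
  if lo < hi then
    if u < (PySem.List.pyGetD recs (((lo + hi) / 2 : Nat) : Int) (0, 0)).1 then
      pvB_bs recs u lo ((lo + hi) / 2)
    else pvB_bs recs u ((lo + hi) / 2 + 1) hi
  else lo
termination_by hi - lo
decreasing_by all_goals omega

def pvB_lookup (recs : List (Int × Int)) (u : Int) : Option Int :=
  let lo := pvB_bs recs u 0 recs.length
  if lo < recs.length then some (PySem.List.pyGetD recs (lo : Int) (0, 0)).2 else none

def check_abp_int_alt (a_peaks : List Int) (up_peaks : List Int) : Bool :=
  let a0 := PySem.List.pyGetD a_peaks 0 0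
  let sink := pvB_sink up_peaks a0 0 up_peaks.length
  let ups := PySem.List.slice up_peaks (some (sink : Int)) none
  let recs := pvB_recs a_peaks none (PySem.List.pyGetD a_peaks (-1) 0)
  let dp := ups.foldl (fun dp u =>
    match pvB_lookup recs u with
    | some v => dp ++ [v]
    | none => dp) []
  (List.range (dp.length - 1)).any (fun i =>
    PySem.List.pyGetD dp ((i : Int) + 1) 0 - PySem.List.pyGetD ups (i : Int) 0 <
    PySem.List.pyGetD ups (i : Int) 0 - PySem.List.pyGetD dp (i : Int) 0)

-- ===== PRECONDITION & SPEC =====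
-- Pre_ excludes exactly the inputs on which the Python A raises IndexError:
-- a_peaks = [] (at a_peaks[0]) or up_peaks = [] (at up_peaks[0]).
def Pre_check_abp_int (a_peaks : List Int) (up_peaks : List Int) : Prop :=
  a_peaks ≠ [] ∧ up_peaks ≠ []
instance (a_peaks : List Int) (up_peaks : List Int) : Decidable (Pre_check_abp_int a_peaks up_peaks) := by
  unfold Pre_check_abp_int; infer_instance

def pvWitness_check_abp_int : List Int × List Int := ([2, 5], [1, 3, 6])

def Spec_check_abp_int (a_peaks : List Int) (up_peaks : List Int) (out : Bool) : Prop := out = check_abp_int_alt a_peaks up_peaks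
instance (a_peaks : List Int) (up_peaks : List Int) (out : Bool) : Decidable (Spec_check_abp_int a_peaks up_peaks out) := by unfold Spec_check_abp_int; infer_instance

-- ===== CLAIM (what is proved, stated in full; the proofs are below) =====
def Claim_equal_check_abp_int : Prop := ∀ (a_peaks : List Int) (up_peaks : List Int), Dom_check_abp_int a_peaks up_peaks → Pre_check_abp_int a_peaks up_peaks → Spec_check_abp_int a_peaks up_peaks (check_abp_int a_peaks up_peaks)


-- ===== LEMMAS AND PROOFS =====

-- linear scan over the list carrying the previous element: first x > u yields its predecessor
def pvScanP (u : Int) (prev : Int) : List Int → Option Int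
  | [] => none
  | x :: xs => if u < x then some prev else pvScanP u x xs

-- linear first-match over the record list
def pvFindRec (u : Int) (recs : List (Int × Int)) : Option Int :=
  (recs.find? (fun r => u < r.1)).map (·.2)

-- A's inner index scan is the prev-carrying scan of the dropped suffix
theorem pvA_find_eq_scan (a : List Int) (u : Int) :
    ∀ j, j ≤ a.length →
      pvA_find a u j = pvScanP u (PySem.List.pyGetD a ((j : Int) - 1) 0) (a.drop j) := by
  intro j hj
  induction hd : a.length - j generalizing j with
  | zero =>
    have hj' : j = a.length := by omega
    subst hj'
    rw [pvA_find]
    simp [pvScanP]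
  | succ n ih =>
    have hjl : j < a.length := by omega
    rw [pvA_find, if_pos hjl]
    rw [List.drop_eq_getElem_cons hjl]
    rw [PySem.List.pyGetD_eq_getElem a 0 (by omega) (by exact_mod_cast hjl)]
    simp only [Int.toNat_natCast]
    by_cases hc : u - a[j] < 0
    · rw [if_pos hc, pvScanP, if_pos (by omega)]
    · rw [if_neg hc, pvScanP, if_neg (by omega)]
      rw [ih (j + 1) (by omega) (by omega)]
      congr 1
      rw [show ((j + 1 : Nat) : Int) - 1 = (j : Int) by push_cast; ring]
      rw [PySem.List.pyGetD_eq_getElem a 0 (by omega) (by exact_mod_cast hjl)]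
      simp

-- the prev-carrying scan equals the linear first-match over the records,
-- provided every value already beaten ('best') is ≤ u
theorem pvScan_eq_findRec (u : Int) :
    ∀ (a : List Int) (best : Option Int) (prev : Int),
      (∀ b, best = some b → b ≤ u) →
      pvScanP u prev a = pvFindRec u (pvB_recs a best prev) := by
  intro a
  induction a with
  | nil => intro best prev _; cases best <;> simp [pvScanP, pvB_recs, pvFindRec]
  | cons v rest ih =>
    intro best prev hbest
    cases best with
    | none =>
      rw [pvB_recs.eq_2, if_pos rfl]
      by_cases hu : u < v
      · simp [pvScanP, pvFindRec, hu]
      · rw [pvScanP, if_neg hu, ih (some v) v (fun b hb => by cases hb; omega)]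
        simp [pvFindRec, hu]
    | some b =>
      have hbu : b ≤ u := hbest b rfl
      rw [pvB_recs.eq_3]
      by_cases hbv : b < v
      · rw [if_pos (by simpa using hbv)]
        by_cases hu : u < v
        · simp [pvScanP, pvFindRec, hu]
        · rw [pvScanP, if_neg hu, ih (some v) v (fun b' hb' => by cases hb'; omega)]
          simp [pvFindRec, hu]
      · rw [if_neg (by simpa using hbv)]
        rw [pvScanP, if_neg (by omega)]
        exact ih (some b) v hbest

-- the record values are strictly increasing, and all exceed 'best'
theorem pvB_recs_sorted :
    ∀ (a : List Int) (best : Option Int) (prev : Int),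
      List.Pairwise (fun r s => r.1 < s.1) (pvB_recs a best prev) ∧
      (∀ b, best = some b → ∀ r ∈ pvB_recs a best prev, b < r.1) := by
  intro a
  induction a with
  | nil => intro best prev; cases best <;> simp [pvB_recs]
  | cons v rest ih =>
    intro best prev
    cases best with
    | none =>
      rw [pvB_recs.eq_2, if_pos rfl]
      obtain ⟨hpw, hlb⟩ := ih (some v) v
      exact ⟨List.pairwise_cons.2 ⟨fun s hs => hlb v rfl s hs, hpw⟩,
        fun b hb => by cases hb⟩
    | some b =>
      rw [pvB_recs.eq_3]
      by_cases hbv : b < v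
      · rw [if_pos (by simpa using hbv)]
        obtain ⟨hpw, hlb⟩ := ih (some v) v
        refine ⟨List.pairwise_cons.2 ⟨fun s hs => hlb v rfl s hs, hpw⟩, ?_⟩
        intro b' hb' r hr
        have hb'b : b' = b := by injection hb' with h; omega
        subst hb'b
        rcases List.mem_cons.1 hr with h | h
        · rw [h]; exact hbv
        · exact lt_trans hbv (hlb v rfl r h)
      · rw [if_neg (by simpa using hbv)]
        exact ih (some b) v

-- binary-search loop invariant
theorem pvB_bs_spec (recs : List (Int × Int)) (u : Int)
    (hs : List.Pairwise (fun r s => r.1 < s.1) recs) :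
    ∀ (n lo hi : Nat), hi - lo ≤ n → lo ≤ hi → hi ≤ recs.length →
      (∀ i (h : i < recs.length), i < lo → ¬ u < recs[i].1) →
      (∀ i (h : i < recs.length), hi ≤ i → u < recs[i].1) →
      pvB_bs recs u lo hi ≤ recs.length ∧
      (∀ i (h : i < recs.length), i < pvB_bs recs u lo hi → ¬ u < recs[i].1) ∧
      (∀ i (h : i < recs.length), pvB_bs recs u lo hi ≤ i → u < recs[i].1) := by
  intro n
  induction n with
  | zero =>
    intro lo hi hd hle hhi hlow hhigh
    have : ¬ lo < hi := by omega
    rw [pvB_bs, if_neg this]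
    exact ⟨by omega, fun i h hi' => hlow i h (by omega), fun i h hi' => hhigh i h (by omega)⟩
  | succ n ih =>
    intro lo hi hd hle hhi hlow hhigh
    by_cases hlt : lo < hi
    case neg =>
      rw [pvB_bs, if_neg hlt]
      exact ⟨by omega, fun i h hi' => hlow i h (by omega), fun i h hi' => hhigh i h (by omega)⟩
    have hmid1 : lo ≤ (lo + hi) / 2 := by omega
    have hmid2 : (lo + hi) / 2 < hi := by omega
    have hmidl : (lo + hi) / 2 < recs.length := by omega
    rw [pvB_bs, if_pos hlt]
    rw [PySem.List.pyGetD_eq_getElem recs (0, 0) (by omega) (by exact_mod_cast hmidl)]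
    simp only [Int.toNat_natCast]
    have hpw := List.pairwise_iff_getElem.1 hs
    by_cases hc : u < recs[(lo + hi) / 2].1
    · rw [if_pos hc]
      refine ih lo ((lo + hi) / 2) (by omega) hmid1 (by omega) hlow ?_
      intro i h hi'
      rcases Nat.eq_or_lt_of_le hi' with h' | h'
      · simpa [← h'] using hc
      · exact lt_trans hc (hpw _ _ hmidl h h')
    · rw [if_neg hc]
      refine ih ((lo + hi) / 2 + 1) hi (by omega) (by omega) hhi ?_ hhigh
      intro i h hi'
      rcases Nat.lt_succ_iff_lt_or_eq.1 hi' with h' | h'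
      · intro hu; exact hc (lt_trans hu (hpw _ _ h hmidl h'))
      · subst h'; exact hc

-- the index returned by the binary search picks out the linear first match
theorem pvIdx_eq_findRec (u : Int) :
    ∀ (recs : List (Int × Int)) (r : Nat), r ≤ recs.length →
      (∀ i (h : i < recs.length), i < r → ¬ u < recs[i].1) →
      (∀ i (h : i < recs.length), r ≤ i → u < recs[i].1) →
      (if h : r < recs.length then some recs[r].2 else none) = pvFindRec u recs := by
  intro recs
  induction recs with
  | nil => intro r hr _ _; simp [pvFindRec]
  | cons x xs ih =>
    intro r hr hlow hhigh
    by_cases hx : u < x.1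
    · have hr0 : r = 0 := by
        by_contra h
        exact hlow 0 (by simp) (by omega) hx
      subst hr0
      simp [pvFindRec, hx]
    · have hr0 : r ≠ 0 := by
        intro h
        exact hx (by simpa [h] using hhigh 0 (by simp) (by omega))
      obtain ⟨r', rfl⟩ := Nat.exists_eq_succ_of_ne_zero hr0
      have hstep : (if h : r' + 1 < (x :: xs).length then some (x :: xs)[r' + 1].2 else none)
          = (if h : r' < xs.length then some xs[r'].2 else none) := by
        by_cases h : r' < xs.length
        · rw [dif_pos (by simpa using Nat.succ_lt_succ h), dif_pos h]
          simp
        · rw [dif_neg (by simpa using fun hh => h (Nat.lt_of_succ_lt_succ hh)), dif_neg h]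
      rw [hstep, ih r' (by simpa using hr)
        (fun i h hi' => hlow (i + 1) (by simpa using Nat.succ_lt_succ h) (by omega))
        (fun i h hi' => hhigh (i + 1) (by simpa using Nat.succ_lt_succ h) (by omega))]
      simp [pvFindRec, hx]

theorem pvB_lookup_eq_findRec (recs : List (Int × Int)) (u : Int)
    (hs : List.Pairwise (fun r s => r.1 < s.1) recs) :
    pvB_lookup recs u = pvFindRec u recs := by
  obtain ⟨h1, h2, h3⟩ := pvB_bs_spec recs u hs recs.length 0 recs.length (by omega) (by omega)
    le_rfl (fun i h hi' => absurd hi' (by omega)) (fun i h hi' => absurd hi' (by omega))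
  rw [pvB_lookup]
  rw [← pvIdx_eq_findRec u recs (pvB_bs recs u 0 recs.length) h1 h2 h3]
  by_cases h : pvB_bs recs u 0 recs.length < recs.length
  · rw [dif_pos h, if_pos h]
    rw [PySem.List.pyGetD_eq_getElem recs (0, 0) (by omega) (by exact_mod_cast h)]
    simp
  · rw [dif_neg h, if_neg h]

-- the per-up-peak value computed by A equals the one computed by B
theorem pv_find_eq (a : List Int) (u : Int) :
    pvA_find a u 0 = pvB_lookup (pvB_recs a none (PySem.List.pyGetD a (-1) 0)) u := by
  rw [pvA_find_eq_scan a u 0 (by omega)]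
  simp only [Nat.cast_zero, zero_sub, List.drop_zero]
  rw [pvScan_eq_findRec u a none (PySem.List.pyGetD a (-1) 0) (by simp)]
  rw [pvB_lookup_eq_findRec _ u (pvB_recs_sorted a none (PySem.List.pyGetD a (-1) 0)).1]

-- A's while-loop index equals B's enumerate-and-break index
theorem pv_sink_eq (up : List Int) (a0 : Int) :
    ∀ sink, sink < up.length →
      pvA_sink up a0 sink = pvB_sink (up.drop sink) a0 sink up.length := by
  intro sink
  induction hd : up.length - sink generalizing sink with
  | zero => omega
  | succ n ih =>
    intro hlt
    rw [pvA_sink]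
    rw [PySem.List.pyGetD_eq_getElem up 0 (by omega) (by exact_mod_cast hlt)]
    simp only [Int.toNat_natCast]
    rw [List.drop_eq_getElem_cons hlt, pvB_sink]
    by_cases hc : up[sink] < a0
    · rw [if_pos hc, if_neg (show ¬ a0 ≤ up[sink] by omega)]
      by_cases hend : up.length ≤ sink + 1
      · rw [if_pos hend]
        have hnil : up.drop (sink + 1) = [] := List.drop_eq_nil_of_le (by omega)
        rw [hnil, pvB_sink]
        omega
      · rw [if_neg hend, ih (sink + 1) (by omega) (by omega)]
    · rw [if_neg hc, if_pos (show a0 ≤ up[sink] by omega)]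

-- ===== VERDICT (by name: the statement is the Claim_ definition above) =====
theorem check_abp_int_spec : Claim_equal_check_abp_int := by
  intro a up _ hpre
  unfold Spec_check_abp_int check_abp_int check_abp_int_alt
  have hup : 0 < up.length := by
    cases up with
    | nil => exact absurd rfl hpre.2
    | cons x xs => simp
  have hsink := pv_sink_eq up (PySem.List.pyGetD a 0 0) 0 hup
  simp only [List.drop_zero] at hsink
  simp only [hsink, pv_find_eq a]
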